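-- pv_equiv track=rewrite | github.com/Dimaaap/Leetcode | Easy/2432.) The Employee That Worked on The Longest Task.py | hardest_worker
-- ===== SOURCE A (Python) =====
-- def hardest_worker(n: int, logs: list[list[int]]):
--     timer = 0
--     current_time = 0
--     ans = 0
--     for emp_id, emp_time in logs:
--         time = emp_time - timer
--         if time > current_time:
--             current_time = time
--             ans = emp_id
--         elif time == current_time:
--             ans = min(ans, emp_id)
--         timer = emp_time
--     return ans
-- ===== SOURCE B (Python) =====
-- def hardest_worker(n: int, logs: list[list[int]]):
--     # Phase 1: build (duration, emp_id) pairs; the (0, 0) baseline is the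
--     # no-task default (employee 0, duration 0), matching the empty-logs answer.
--     pairs = [(0, 0)]
--     prev = 0
--     for emp_id, emp_time in logs:
--         pairs.append((emp_time - prev, emp_id))
--         prev = emp_time
--     # Phase 2: global max duration, then min id among tasks attaining it.
--     best = max(d for d, _ in pairs)
--     return min(i for d, i in pairs if d == best)
-- ===== Notes on version B (the rewrite author's own statement) =====
-- stated objective: alternative
-- what changed: Replaces the fused single-scan max/argmin with a two-phase build-then-select: first materialise (duration, id) pairs (seeded with the (0,0) no-task baseline), then take the max duration and the min id among pairs attaining it.
import Mathlib
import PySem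

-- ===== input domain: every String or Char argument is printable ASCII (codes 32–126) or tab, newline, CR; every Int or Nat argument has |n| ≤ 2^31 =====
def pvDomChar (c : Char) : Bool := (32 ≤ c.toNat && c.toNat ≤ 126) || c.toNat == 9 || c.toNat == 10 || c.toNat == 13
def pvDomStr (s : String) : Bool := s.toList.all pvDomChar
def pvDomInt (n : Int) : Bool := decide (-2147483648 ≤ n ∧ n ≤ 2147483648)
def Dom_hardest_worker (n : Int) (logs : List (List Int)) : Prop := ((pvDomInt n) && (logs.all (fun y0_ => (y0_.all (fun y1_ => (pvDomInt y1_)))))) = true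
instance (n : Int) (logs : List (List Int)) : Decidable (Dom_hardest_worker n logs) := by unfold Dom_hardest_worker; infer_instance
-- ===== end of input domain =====

-- B replaces A's fused single-scan max/argmin with a build-pairs-then-select two-pass (same O(n) cost); proved equal on Pre_ (all inner logs of length 2).

-- ===== PORT A =====
-- state = (timer, current_time, ans); malformed inner lists (length ≠ 2) are a
-- ValueError in Python, excluded by Pre_; the port leaves the state unchanged there.
def hardest_worker (n : Int) (logs : List (List Int)) : Int :=
  (logs.foldl (fun (st : Int × Int × Int) log =>
    match log with
    | [emp_id, emp_time] =>
      let time := emp_time - st.1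
      if time > st.2.1 then (emp_time, time, emp_id)
      else if time = st.2.1 then (emp_time, st.2.1, min st.2.2 emp_id)
      else (emp_time, st.2.1, st.2.2)
    | _ => st) ((0 : Int), (0 : Int), (0 : Int))).2.2

-- ===== PORT B =====
-- B-side tuple unpacking 'emp_id, emp_time = log' (none = ValueError, excluded by Pre_)
def pvUnpack2 (l : List Int) : Option (Int × Int) :=
  l.casesOn none fun a t =>
    t.casesOn none fun b u =>
      u.casesOn (some (a, b)) fun _ _ => none

-- Phase 1 of Source B: the pair list seeded with the (0,0) baseline, with the running prev.
def pvPairs (logs : List (List Int)) : List (Int × Int) :=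
  (logs.foldl (fun (st : List (Int × Int) × Int) log =>
    match pvUnpack2 log with
    | some (emp_id, emp_time) => (st.1 ++ [(emp_time - st.2, emp_id)], emp_time)
    | none => st) (([((0 : Int), (0 : Int))] : List (Int × Int)), (0 : Int))).1

-- Phase 2 of Source B: max of the durations, then min id among pairs attaining it
-- (both lists are provably nonempty — pairs contains the seed — so .getD 0 is a totality guard only).
def pvSelect (pairs : List (Int × Int)) : Int :=
  let best := (PySem.List.max? (pairs.map Prod.fst) (fun x => x)).getD 0
  (PySem.List.min? ((pairs.filter (fun p => p.1 = best)).map Prod.snd) (fun x => x)).getD 0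

def hardest_worker_alt (n : Int) (logs : List (List Int)) : Int :=
  pvSelect (pvPairs logs)

-- ===== PRECONDITION & SPEC =====
-- Pre_ excludes exactly the inputs where Python A raises: an inner list whose
-- length is not 2 makes the tuple unpacking 'emp_id, emp_time' raise ValueError.
def Pre_hardest_worker (n : Int) (logs : List (List Int)) : Prop :=
  logs.all (fun l => l.length = 2) = true
instance (n : Int) (logs : List (List Int)) : Decidable (Pre_hardest_worker n logs) := by
  unfold Pre_hardest_worker; infer_instance
def pvWitness_hardest_worker : Int × List (List Int) := (2, [[0, 3], [1, 5]])

def Spec_hardest_worker (n : Int) (logs : List (List Int)) (out : Int) : Prop := out = hardest_worker_alt n logs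
instance (n : Int) (logs : List (List Int)) (out : Int) : Decidable (Spec_hardest_worker n logs out) := by unfold Spec_hardest_worker; infer_instance

-- ===== CLAIM (what is proved, stated in full; the proofs are below) =====
def Claim_equal_hardest_worker : Prop := ∀ (n : Int) (logs : List (List Int)), Dom_hardest_worker n logs → Pre_hardest_worker n logs → Spec_hardest_worker n logs (hardest_worker n logs)

-- ===== LEMMAS AND PROOFS =====

-- durations of the logs relative to a starting timer t (malformed logs skipped, as in both ports)
def pvDurs (t : Int) : List (List Int) → List (Int × Int)
  | [] => []
  | log :: rest =>
    match log with
    | [emp_id, emp_time] => (emp_time - t, emp_id) :: pvDurs emp_time rest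
    | _ => pvDurs t rest

-- A's fused update on a (current_time, ans) pair consuming one (duration, id) pair
def pvStep (s : Int × Int) (p : Int × Int) : Int × Int :=
  if p.1 > s.1 then p else if p.1 = s.1 then (s.1, min s.2 p.2) else s

theorem pvUnpack2_two (a b : Int) : pvUnpack2 [a, b] = some (a, b) := rfl
theorem pvUnpack2_nil : pvUnpack2 ([] : List Int) = none := rfl
theorem pvUnpack2_one (a : Int) : pvUnpack2 [a] = none := rfl
theorem pvUnpack2_big (a b c : Int) (w : List Int) : pvUnpack2 (a :: b :: c :: w) = none := rfl

theorem pvPairs_general (logs : List (List Int)) :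
    ∀ (acc : List (Int × Int)) (t : Int),
      (logs.foldl (fun (st : List (Int × Int) × Int) log =>
        match pvUnpack2 log with
        | some (emp_id, emp_time) => (st.1 ++ [(emp_time - st.2, emp_id)], emp_time)
        | none => st) (acc, t)).1 = acc ++ pvDurs t logs := by
  induction logs with
  | nil => intro acc t; simp [pvDurs]
  | cons log rest ih =>
    intro acc t
    match log with
    | [emp_id, emp_time] => simp [List.foldl, pvUnpack2_two, pvDurs, ih]
    | [] => simp [List.foldl, pvUnpack2_nil, pvDurs, ih]
    | [x] => simp [List.foldl, pvUnpack2_one, pvDurs, ih]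
    | x :: y :: z :: w => simp [List.foldl, pvUnpack2_big, pvDurs, ih]

theorem pvPairs_eq (logs : List (List Int)) :
    pvPairs logs = ((0 : Int), (0 : Int)) :: pvDurs 0 logs := by
  simpa using pvPairs_general logs [((0 : Int), (0 : Int))] 0

theorem hardest_worker_general (logs : List (List Int)) :
    ∀ (t c a : Int),
      (logs.foldl (fun (st : Int × Int × Int) log =>
        match log with
        | [emp_id, emp_time] =>
          let time := emp_time - st.1
          if time > st.2.1 then (emp_time, time, emp_id)
          else if time = st.2.1 then (emp_time, st.2.1, min st.2.2 emp_id)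
          else (emp_time, st.2.1, st.2.2)
        | _ => st) (t, c, a)).2 = (pvDurs t logs).foldl pvStep (c, a) := by
  induction logs with
  | nil => intro t c a; simp [pvDurs]
  | cons log rest ih =>
    intro t c a
    match log with
    | [emp_id, emp_time] =>
      simp only [List.foldl, pvDurs, pvStep]
      by_cases h1 : emp_time - t > c
      · simp [h1, ih]
      · by_cases h2 : emp_time - t = c
        · simp [h1, h2, ih]
        · simp [h1, h2, ih]
    | [] => simp [List.foldl, pvDurs, ih]
    | [x] => simp [List.foldl, pvDurs, ih]
    | x :: y :: z :: w => simp [List.foldl, pvDurs, ih]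

-- head-swap: applying A's fused step to the head agrees with B's two-pass selection
theorem pvSelect_step (c a d i : Int) (ps : List (Int × Int)) :
    pvSelect (pvStep (c, a) (d, i) :: ps) = pvSelect ((c, a) :: (d, i) :: ps) := by
  have hmax := (PySem.List.le_foldl_max (ps.map Prod.fst) d).1
  unfold pvStep pvSelect
  by_cases h1 : d > c
  · have hcd : max c d = d := by omega
    have hne : ¬ (c = (ps.map Prod.fst).foldl max d) := by omega
    simp [h1, PySem.List.max?_id_cons, List.foldl, hcd, List.filter, hne]
  · by_cases h2 : d = c
    · subst h2
      simp only [h1, if_false, if_pos rfl]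
      have hcd : max d d = d := by omega
      simp only [PySem.List.max?_id_cons, List.map, List.foldl, hcd, Option.getD_some]
      by_cases hc : d = (ps.map Prod.fst).foldl max d
      · simp only [List.filter, decide_eq_true_eq, ← hc, if_pos rfl, reduceIte]
        simp [PySem.List.min?_id_cons, List.foldl]
      · simp [List.filter, hc]
    · have h3 : d < c := by omega
      have hcd : max c d = c := by omega
      have hne : ¬ (d = (ps.map Prod.fst).foldl max c) := by
        have := (PySem.List.le_foldl_max (ps.map Prod.fst) c).1; omega
      simp [h1, h2, PySem.List.max?_id_cons, List.foldl, hcd, List.filter, hne]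

theorem pvFold_eq_select (ps : List (Int × Int)) :
    ∀ (c a : Int), ps.foldl pvStep (c, a) = ((ps.foldl pvStep (c, a)).1, pvSelect ((c, a) :: ps)) := by
  induction ps with
  | nil =>
    intro c a
    simp [pvSelect, PySem.List.max?_id_cons, List.filter, PySem.List.min?_id_cons]
  | cons p rest ih =>
    intro c a
    obtain ⟨d, i⟩ := p
    simp only [List.foldl]
    rw [← pvSelect_step]
    have h := ih (pvStep (c, a) (d, i)).1 (pvStep (c, a) (d, i)).2
    simpa using h

-- ===== VERDICT (by name: the statement is the Claim_ definition above) =====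
theorem hardest_worker_spec : Claim_equal_hardest_worker := by
  intro n logs _ _
  unfold Spec_hardest_worker hardest_worker hardest_worker_alt
  rw [hardest_worker_general logs 0 0 0, pvPairs_eq]
  have := pvFold_eq_select (pvDurs 0 logs) 0 0
  rw [this]
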